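-- pv_equiv track=rewrite | github.com/Lucenix/LA2 | treino1/torneio1.py | formula1
-- ===== SOURCE A (Python) =====
-- def formula1(log):
--     ha = {}
--     flag = 1
--     for entry in sorted(log):
--         if entry[1] not in ha:
--             ha[entry[1]] = [entry[0], entry[0]]
--             if flag == 1:
--                 mintemp = entry[0]
--                 flag = 0
--             elif mintemp > entry[0]:
--                 mintemp = entry[0]
--
--         elif((entry[0] - ha[entry[1]][1])<ha[entry[1]][0]):
--             ha[entry[1]][0] = entry[0] - ha[entry[1]][1]
--             if mintemp > entry[0] - ha[entry[1]][1]: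
--                 mintemp = entry[0] - ha[entry[1]][1]
--
--         ha[entry[1]][1] = entry[0]
--
--     return list(filter(lambda n: ha[n][0]==mintemp,sorted(ha)))
-- ===== SOURCE B (Python) =====
-- def minval(ts):
--     ts = sorted(ts)
--     return min([ts[0]] + [b - a for a, b in zip(ts, ts[1:])])
--
--
-- def formula1(log):
--     groups = {}
--     for t, d in log:
--         groups.setdefault(d, []).append(t)
--     best = {d: minval(ts) for d, ts in groups.items()}
--     if not best:
--         return []
--     g = min(best.values())
--     return sorted(d for d in best if best[d] == g)
-- ===== Notes on version B (the rewrite author's own statement) =====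
-- stated objective: alternative
-- what changed: Replaces A's single stateful sweep over the globally sorted log (a dict of [running-min, last-time] pairs plus a flag/mintemp accumulator) by a group-by-driver decomposition: group each driver's timestamps, compute per driver min(first timestamp, smallest consecutive gap of its sorted timestamps), then return the sorted drivers attaining the global minimum.
import Mathlib
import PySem

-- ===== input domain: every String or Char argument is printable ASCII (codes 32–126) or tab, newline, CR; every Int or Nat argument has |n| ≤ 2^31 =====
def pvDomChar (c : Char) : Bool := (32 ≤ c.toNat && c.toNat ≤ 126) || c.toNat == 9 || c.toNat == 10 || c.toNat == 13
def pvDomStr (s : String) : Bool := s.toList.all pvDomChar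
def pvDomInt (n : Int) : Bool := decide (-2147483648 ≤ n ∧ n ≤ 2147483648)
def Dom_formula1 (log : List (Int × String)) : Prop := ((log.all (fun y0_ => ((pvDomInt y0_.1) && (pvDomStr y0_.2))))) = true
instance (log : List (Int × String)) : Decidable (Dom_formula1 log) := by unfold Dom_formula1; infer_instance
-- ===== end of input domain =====

-- B groups timestamps per driver and takes min(first timestamp, smallest consecutive gap) per driver,
-- instead of A's single stateful sweep over the sorted log; same O(n log n) cost, different decomposition.

-- ===== PORT A =====
-- the loop body: ha is the dict, st.2.1 is flag, st.2.2 is mintemp (mintemp starts at a dummy 0,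
-- which Python leaves undefined; it is only read after flag has been set to 0, exactly as in Python)
def pvStepA (st : PySem.Dict String (Int × Int) × Int × Int) (entry : Int × String) :
    PySem.Dict String (Int × Int) × Int × Int :=
  match st.1.get? entry.2 with
  | none =>
      -- ha[entry[1]] = [entry[0], entry[0]]  (the trailing ha[entry[1]][1] = entry[0] is a no-op here)
      let fm : Int × Int :=
        if st.2.1 = 1 then (0, entry.1)
        else if st.2.2 > entry.1 then (st.2.1, entry.1) else (st.2.1, st.2.2)
      (st.1.insert entry.2 (entry.1, entry.1), fm)
  | some v =>
      if entry.1 - v.2 < v.1 then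
        -- ha[entry[1]][0] = gap; mintemp update; then ha[entry[1]][1] = entry[0]
        (st.1.insert entry.2 (entry.1 - v.2, entry.1), st.2.1,
          if st.2.2 > entry.1 - v.2 then entry.1 - v.2 else st.2.2)
      else
        -- only ha[entry[1]][1] = entry[0]
        (st.1.insert entry.2 (v.1, entry.1), st.2.1, st.2.2)

def formula1 (log : List (Int × String)) : List String :=
  let st := (PySem.List.sorted2 log (fun e => e.1) (fun e => e.2)).foldl pvStepA (PySem.Dict.empty, 1, 0)
  -- list(filter(lambda n: ha[n][0]==mintemp, sorted(ha))); every n drawn from sorted(ha) is a key, so getD is exact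
  (PySem.List.sorted st.1.keys (fun x => x) false).filter (fun n => (st.1.getD n (0, 0)).1 == st.2.2)

-- ===== PORT B =====
-- min([ts[0]] + [b - a for a, b in zip(ts, ts[1:])]) after ts = sorted(ts); minval is only ever
-- applied to a nonempty group, so headD/getD are exact there
def pvMinval (ts0 : List Int) : Int :=
  let ts := PySem.List.sorted ts0 (fun x => x) false
  (PySem.List.min? (ts.headD 0 :: (ts.zip ts.tail).map (fun p => p.2 - p.1)) (fun x => x)).getD 0

def formula1_alt (log : List (Int × String)) : List String :=
  let groups : PySem.Dict String (List Int) :=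
    log.foldl (fun g e => g.modify e.2 [] (fun ts => ts ++ [e.1])) PySem.Dict.empty
  let best : PySem.Dict String Int :=
    groups.items.foldl (fun b p => b.insert p.1 (pvMinval p.2)) PySem.Dict.empty
  match PySem.List.min? best.values (fun x => x) with
  | none => []  -- best is empty: Python returns [] before taking min
  | some g => PySem.List.sorted (best.keys.filter (fun d => best.getD d 0 == g)) (fun x => x) false

-- ===== PRECONDITION & SPEC =====
def Spec_formula1 (log : List (Int × String)) (out : List String) : Prop := out = formula1_alt log
instance (log : List (Int × String)) (out : List String) : Decidable (Spec_formula1 log out) := by unfold Spec_formula1; infer_instance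

-- ===== CLAIM (what is proved, stated in full; the proofs are below) =====
def Claim_equal_formula1 : Prop := ∀ (log : List (Int × String)), Dom_formula1 log → Spec_formula1 log (formula1 log)

-- ===== LEMMAS AND PROOFS =====

-- proof-only helpers: the timestamps of driver d, in order of appearance
def pvTimes (xs : List (Int × String)) (d : String) : List Int :=
  (xs.filter (fun e => e.2 == d)).map (fun e => e.1)

-- one per-driver step of A's dict update, and the per-driver state after a whole list
def pvStep (v : Int × Int) (t : Int) : Int × Int :=
  (if t - v.2 < v.1 then t - v.2 else v.1, t)

def pvProc : List Int → Option (Int × Int)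
  | [] => none
  | t :: ts => some (ts.foldl pvStep (t, t))

def pvDiffs : Int → List Int → List Int
  | _, [] => []
  | l, t :: ts => (t - l) :: pvDiffs t ts

def pvLast : Int → List Int → Int
  | l, [] => l
  | _, t :: ts => pvLast t ts

-- the comparison sorted2 uses, and the lexicographic order it produces
def pvBefore (a b : Int × String) : Bool :=
  decide (a.1 < b.1) || (!decide (b.1 < a.1) && decide (a.2 < b.2))

def pvLex (a b : Int × String) : Prop := a.1 < b.1 ∨ (a.1 = b.1 ∧ a.2 ≤ b.2)

-- A's loop invariant over the processed prefix p
def pvInv (p : List (Int × String)) (st : PySem.Dict String (Int × Int) × Int × Int) : Prop :=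
  st.1.keys.Nodup ∧
  (∀ d, st.1.get? d = pvProc (pvTimes p d)) ∧
  ((p = [] ∧ st.2.1 = 1) ∨
   (p ≠ [] ∧ st.2.1 = 0 ∧ (∀ d v, st.1.get? d = some v → st.2.2 ≤ v.1) ∧
    (∃ d v, st.1.get? d = some v ∧ st.2.2 = v.1)))

lemma pvLex_total (a b : Int × String) : pvLex a b ∨ pvLex b a := by
  unfold pvLex
  rcases lt_trichotomy a.1 b.1 with h | h | h
  · exact Or.inl (Or.inl h)
  · rcases le_total a.2 b.2 with h2 | h2
    · exact Or.inl (Or.inr ⟨h, h2⟩)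
    · exact Or.inr (Or.inr ⟨h.symm, h2⟩)
  · exact Or.inr (Or.inl h)

lemma pvLex_trans {a b c : Int × String} : pvLex a b → pvLex b c → pvLex a c := by
  unfold pvLex
  rintro (h1 | ⟨h1, h1'⟩) (h2 | ⟨h2, h2'⟩)
  · exact Or.inl (h1.trans h2)
  · exact Or.inl (h2 ▸ h1)
  · exact Or.inl (h1 ▸ h2)
  · exact Or.inr ⟨h1.trans h2, h1'.trans h2'⟩

lemma pvBefore_false_iff (a b : Int × String) : pvBefore b a = false ↔ pvLex a b := by
  simp only [pvBefore, pvLex, Bool.or_eq_false_iff, Bool.and_eq_false_iff, Bool.not_eq_false',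
    decide_eq_false_iff_not, decide_eq_true_eq, not_lt]
  constructor
  · rintro ⟨h1, h2 | h2⟩
    · exact Or.inl h2
    · rcases lt_or_eq_of_le h1 with h | h
      · exact Or.inl h
      · exact Or.inr ⟨h, h2⟩
  · rintro (h | ⟨h, h2⟩)
    · exact ⟨le_of_lt h, Or.inl h⟩
    · exact ⟨le_of_eq h, Or.inr h2⟩

lemma pvBefore_true_lex {a b : Int × String} (h : pvBefore a b = true) : pvLex a b := by
  rcases pvLex_total a b with h' | h'
  · exact h'
  · exfalso
    have := (pvBefore_false_iff b a).mpr h'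
    rw [h] at this
    exact Bool.true_eq_false.mp this

lemma pvPairwise_insertBy (x : Int × String) (ys : List (Int × String))
    (h : ys.Pairwise pvLex) : (PySem.List.insertBy pvBefore x ys).Pairwise pvLex := by
  induction ys with
  | nil => simp [PySem.List.insertBy]
  | cons y ys ih =>
    rw [List.pairwise_cons] at h
    obtain ⟨hy, hys⟩ := h
    by_cases hb : pvBefore x y = true
    · simp only [PySem.List.insertBy, hb, if_true]
      refine List.Pairwise.cons ?_ (List.Pairwise.cons hy hys)
      intro z hz
      rcases List.mem_cons.mp hz with rfl | hz
      · exact pvBefore_true_lex hb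
      · exact pvLex_trans (pvBefore_true_lex hb) (hy z hz)
    · rw [Bool.not_eq_true] at hb
      simp only [PySem.List.insertBy, hb]
      refine List.Pairwise.cons ?_ (ih hys)
      intro z hz
      have hmem := (PySem.List.insertBy_mem_iff pvBefore x z ys).mp hz
      rcases hmem with rfl | hz2
      · exact (pvBefore_false_iff y z).mp hb
      · exact hy z hz2

lemma pvPairwise_sorted2 (log : List (Int × String)) :
    (PySem.List.sorted2 log (fun e => e.1) (fun e => e.2) false).Pairwise pvLex := by
  have : ∀ (l acc : List (Int × String)), acc.Pairwise pvLex →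
      (l.foldl (fun acc x => PySem.List.insertBy pvBefore x acc) acc).Pairwise pvLex := by
    intro l
    induction l with
    | nil => intro acc h; exact h
    | cons e l ih => intro acc h; exact ih _ (pvPairwise_insertBy e acc h)
  exact this log [] List.Pairwise.nil

lemma pvTimes_pairwise_le (log : List (Int × String)) (d : String) :
    (pvTimes (PySem.List.sorted2 log (fun e => e.1) (fun e => e.2) false) d).Pairwise (· ≤ ·) := by
  unfold pvTimes
  rw [List.pairwise_map]
  refine List.Pairwise.imp_of_mem ?_ ((pvPairwise_sorted2 log).filter _)
  intro a b ha hb hab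
  have ha2 : a.2 = d := by simpa using (List.mem_filter.mp ha).2
  have hb2 : b.2 = d := by simpa using (List.mem_filter.mp hb).2
  rcases hab with h | ⟨h, _⟩
  · exact le_of_lt h
  · exact le_of_eq h

lemma pvTimes_perm {xs ys : List (Int × String)} (h : xs.Perm ys) (d : String) :
    (pvTimes xs d).Perm (pvTimes ys d) := (h.filter _).map _

lemma pvSortedTimes (log : List (Int × String)) (d : String) :
    PySem.List.sorted (pvTimes log d) (fun x => x) false
      = pvTimes (PySem.List.sorted2 log (fun e => e.1) (fun e => e.2) false) d :=
  PySem.List.sorted_id_eq_of_perm_of_pairwise _ _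
    (pvTimes_perm (PySem.List.sorted2_perm log _ _ false) d) (pvTimes_pairwise_le log d)

lemma pvStep_eq (m l t : Int) : pvStep (m, l) t = (min m (t - l), t) := by
  simp only [pvStep, Int.min_def]
  split_ifs <;> first | rfl | omega

lemma pvFoldStep (ts : List Int) (m l : Int) :
    ts.foldl pvStep (m, l) = ((pvDiffs l ts).foldl min m, pvLast l ts) := by
  induction ts generalizing m l with
  | nil => rfl
  | cons t ts ih => simp [pvDiffs, pvLast, List.foldl_cons, pvStep_eq, ih]

lemma pvProc_cons (t0 : Int) (rest : List Int) :
    pvProc (t0 :: rest) = some ((pvDiffs t0 rest).foldl min t0, pvLast t0 rest) := by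
  simp [pvProc, pvFoldStep]

lemma pvZipDiffs (t0 : Int) (rest : List Int) :
    ((t0 :: rest).zip rest).map (fun p => p.2 - p.1) = pvDiffs t0 rest := by
  induction rest generalizing t0 with
  | nil => rfl
  | cons t ts ih =>
    simp only [pvDiffs]
    rw [← ih t]
    simp [List.zip]

lemma pvMinval_eq (ts0 : List Int) (t0 : Int) (rest : List Int)
    (h : PySem.List.sorted ts0 (fun x => x) false = t0 :: rest) :
    pvMinval ts0 = (pvDiffs t0 rest).foldl min t0 := by
  simp [pvMinval, h, pvZipDiffs, PySem.List.min?_id_cons]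

lemma pvTimes_append (p : List (Int × String)) (e : Int × String) (d : String) :
    pvTimes (p ++ [e]) d = pvTimes p d ++ (if e.2 = d then [e.1] else []) := by
  simp only [pvTimes, List.filter_append, List.map_append]
  congr 1
  by_cases h : e.2 = d <;> simp [h]

lemma pvTimes_ne_nil_iff (xs : List (Int × String)) (d : String) :
    pvTimes xs d ≠ [] ↔ d ∈ xs.map (fun e => e.2) := by
  simp only [pvTimes, ne_eq, List.map_eq_nil_iff, List.filter_eq_nil_iff, not_forall]
  constructor
  · rintro ⟨e, he, hd⟩
    simp only [beq_iff_eq, Decidable.not_not] at hd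
    exact List.mem_map.mpr ⟨e, he, hd⟩
  · rintro h
    obtain ⟨e, he, hd⟩ := List.mem_map.mp h
    exact ⟨e, he, by simp [hd]⟩

lemma pvProc_append (ts : List Int) (t : Int) :
    pvProc (ts ++ [t]) = some (match pvProc ts with | none => (t, t) | some v => pvStep v t) := by
  cases ts with
  | nil => rfl
  | cons t0 rest => simp [pvProc, List.foldl_append]

lemma pvInv_init : pvInv [] (PySem.Dict.empty, 1, 0) := by
  refine ⟨by simp [PySem.Dict.keys_empty], fun d => by simp [PySem.Dict.get?_empty, pvTimes, pvProc], Or.inl ⟨rfl, rfl⟩⟩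

lemma pvGet_insert_inv (D : PySem.Dict String (Int × Int)) (p : List (Int × String))
    (e : Int × String) (w : Int × Int)
    (hget : ∀ d, D.get? d = pvProc (pvTimes p d))
    (hw : pvProc (pvTimes (p ++ [e]) e.2) = some w) :
    ∀ d, (D.insert e.2 w).get? d = pvProc (pvTimes (p ++ [e]) d) := by
  intro d
  rw [PySem.Dict.get?_insert, pvTimes_append]
  by_cases hd : d = e.2
  · subst hd
    rw [if_pos rfl, ← pvTimes_append, hw]
  · rw [if_neg hd, hget d]
    have h2 : ¬ e.2 = d := fun hh => hd hh.symm
    simp [h2]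

lemma pvInv_step (p : List (Int × String)) (st : PySem.Dict String (Int × Int) × Int × Int)
    (e : Int × String) (h : pvInv p st) : pvInv (p ++ [e]) (pvStepA st e) := by
  obtain ⟨hnd, hget, hfm⟩ := h
  unfold pvStepA
  cases hv : st.1.get? e.2 with
  | none =>
    have ht : pvTimes p e.2 = [] := by
      have h0 := hget e.2; rw [hv] at h0
      cases hts : pvTimes p e.2 with
      | nil => rfl
      | cons a b => rw [hts, pvProc_cons] at h0; exact absurd h0 (by simp)
    have hw : pvProc (pvTimes (p ++ [e]) e.2) = some (e.1, e.1) := by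
      rw [pvTimes_append, ht, if_pos rfl]
      simp [pvProc]
    refine ⟨PySem.Dict.nodup_keys_insert _ _ _ hnd, pvGet_insert_inv st.1 p e _ hget hw, ?_⟩
    by_cases hf : st.2.1 = 1
    · -- first entry ever: p = []
      have hp : p = [] := by
        rcases hfm with ⟨hp, _⟩ | ⟨_, hfl, _⟩
        · exact hp
        · exact absurd hf (by omega)
      subst hp
      rw [if_pos hf]
      refine Or.inr ⟨by simp, rfl, ?_, ?_⟩
      · intro d v hdv
        rw [PySem.Dict.get?_insert] at hdv
        by_cases hd : d = e.2
        · rw [if_pos hd] at hdv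
          cases hdv
          exact le_refl _
        · rw [if_neg hd, hget d] at hdv
          simp [pvTimes, pvProc] at hdv
      · exact ⟨e.2, (e.1, e.1), by rw [PySem.Dict.get?_insert, if_pos rfl], rfl⟩
    · -- later new driver: flag is 0, mintemp is a true minimum
      rcases hfm with ⟨_, hfl⟩ | ⟨hpne, hfl, hb, d0, v0, hd0, hm⟩
      · exact absurd hfl hf
      rw [if_neg hf]
      by_cases hgt : st.2.2 > e.1
      · rw [if_pos hgt]
        refine Or.inr ⟨by simp, hfl, ?_, ?_⟩
        · intro d v hdv
          rw [PySem.Dict.get?_insert] at hdv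
          by_cases hd : d = e.2
          · rw [if_pos hd] at hdv; cases hdv; exact le_refl _
          · rw [if_neg hd] at hdv
            exact (lt_of_lt_of_le hgt (hb d v hdv)).le
        · exact ⟨e.2, (e.1, e.1), by rw [PySem.Dict.get?_insert, if_pos rfl], rfl⟩
      · rw [if_neg hgt]
        rw [not_lt] at hgt
        refine Or.inr ⟨by simp, hfl, ?_, ?_⟩
        · intro d v hdv
          rw [PySem.Dict.get?_insert] at hdv
          by_cases hd : d = e.2
          · rw [if_pos hd] at hdv; cases hdv; exact hgt
          · rw [if_neg hd] at hdv; exact hb d v hdv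
        · have hne : d0 ≠ e.2 := by
            intro hh; rw [hh, hv] at hd0; exact absurd hd0 (by simp)
          exact ⟨d0, v0, by rw [PySem.Dict.get?_insert, if_neg hne]; exact hd0, hm⟩
  | some v =>
    have hne : pvTimes p e.2 ≠ [] := by
      intro hts
      have h0 := hget e.2
      rw [hv, hts] at h0
      exact absurd h0 (by simp [pvProc])
    have hpne : p ≠ [] := by
      intro hp; apply hne; rw [hp]; rfl
    rcases hfm with ⟨hp, _⟩ | ⟨_, hfl, hb, d0, v0, hd0, hm⟩
    · exact absurd hp hpne
    have hw : pvProc (pvTimes (p ++ [e]) e.2) = some (pvStep v e.1) := by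
      rw [pvTimes_append, if_pos rfl, pvProc_append]
      have h0 := (hget e.2).symm.trans hv
      rw [h0]
    show pvInv (p ++ [e])
      (if e.1 - v.2 < v.1 then
        (st.1.insert e.2 (e.1 - v.2, e.1), st.2.1, if st.2.2 > e.1 - v.2 then e.1 - v.2 else st.2.2)
      else (st.1.insert e.2 (v.1, e.1), st.2.1, st.2.2))
    by_cases hlt : e.1 - v.2 < v.1
    · rw [if_pos hlt]
      have hw' : pvProc (pvTimes (p ++ [e]) e.2) = some (e.1 - v.2, e.1) := by
        rw [hw]; simp [pvStep, hlt]
      refine ⟨PySem.Dict.nodup_keys_insert _ _ _ hnd,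
        pvGet_insert_inv st.1 p e _ hget hw', ?_⟩
      by_cases hgt : st.2.2 > e.1 - v.2
      · rw [if_pos hgt]
        refine Or.inr ⟨by simp, hfl, ?_, ?_⟩
        · intro d w hdw
          rw [PySem.Dict.get?_insert] at hdw
          by_cases hd : d = e.2
          · rw [if_pos hd] at hdw; cases hdw; exact le_refl _
          · rw [if_neg hd] at hdw; exact le_of_lt hgt |>.trans (hb d w hdw)
        · exact ⟨e.2, (e.1 - v.2, e.1), by rw [PySem.Dict.get?_insert, if_pos rfl], rfl⟩
      · rw [if_neg hgt]
        rw [not_lt] at hgt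
        refine Or.inr ⟨by simp, hfl, ?_, ?_⟩
        · intro d w hdw
          rw [PySem.Dict.get?_insert] at hdw
          by_cases hd : d = e.2
          · rw [if_pos hd] at hdw; cases hdw; exact hgt
          · rw [if_neg hd] at hdw; exact hb d w hdw
        · have hd0e : d0 ≠ e.2 := by
            intro hh
            rw [hh, hv] at hd0
            cases hd0
            -- then mintemp = v.1, but e.1 - v.2 < v.1 and mintemp ≤ e.1 - v.2
            exact absurd hm (by omega)
          exact ⟨d0, v0, by rw [PySem.Dict.get?_insert, if_neg hd0e]; exact hd0, hm⟩
    · rw [if_neg hlt]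
      have hw' : pvProc (pvTimes (p ++ [e]) e.2) = some (v.1, e.1) := by
        rw [hw]; simp [pvStep, hlt]
      refine ⟨PySem.Dict.nodup_keys_insert _ _ _ hnd,
        pvGet_insert_inv st.1 p e _ hget hw', ?_⟩
      refine Or.inr ⟨by simp, hfl, ?_, ?_⟩
      · intro d w hdw
        rw [PySem.Dict.get?_insert] at hdw
        by_cases hd : d = e.2
        · rw [if_pos hd] at hdw; cases hdw; exact hb e.2 v hv
        · rw [if_neg hd] at hdw; exact hb d w hdw
      · by_cases hd0e : d0 = e.2
        · refine ⟨e.2, (v.1, e.1), by rw [PySem.Dict.get?_insert, if_pos rfl], ?_⟩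
          rw [hd0e, hv] at hd0
          cases hd0
          exact hm
        · exact ⟨d0, v0, by rw [PySem.Dict.get?_insert, if_neg hd0e]; exact hd0, hm⟩

lemma pvInv_fold (l p : List (Int × String)) (st : PySem.Dict String (Int × Int) × Int × Int)
    (h : pvInv p st) : pvInv (p ++ l) (l.foldl pvStepA st) := by
  induction l generalizing p st with
  | nil => simpa using h
  | cons e l ih =>
    have := ih (p ++ [e]) (pvStepA st e) (pvInv_step p st e h)
    simpa using this

lemma pvTimes_cons (e : Int × String) (l : List (Int × String)) (d : String) :
    pvTimes (e :: l) d = (if e.2 = d then [e.1] else []) ++ pvTimes l d := by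
  simp only [pvTimes, List.filter_cons]
  by_cases h : e.2 = d <;> simp [h]

lemma pvGroups_getD (l : List (Int × String)) (g : PySem.Dict String (List Int)) (d : String) :
    (l.foldl (fun g e => g.modify e.2 [] (fun ts => ts ++ [e.1])) g).getD d []
      = g.getD d [] ++ pvTimes l d := by
  induction l generalizing g with
  | nil => simp [pvTimes]
  | cons e l ih =>
    rw [List.foldl_cons, ih, PySem.Dict.getD_modify, pvTimes_cons]
    by_cases hd : d = e.2
    · simp [hd]
    · have h2 : ¬ e.2 = d := fun hh => hd hh.symm
      simp [hd, h2]

lemma pvProc_eq_none_iff (ts : List Int) : pvProc ts = none ↔ ts = [] := by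
  cases ts <;> simp [pvProc]

lemma pvMain (log : List (Int × String)) (hlog : log ≠ []) : formula1 log = formula1_alt log := by
  simp only [formula1, formula1_alt]
  set s := PySem.List.sorted2 log (fun e => e.1) (fun e => e.2) false with hs
  set st := s.foldl pvStepA (PySem.Dict.empty, 1, 0) with hst
  set G := log.foldl (fun g e => g.modify e.2 [] (fun ts => ts ++ [e.1])) PySem.Dict.empty with hG
  set B := G.items.foldl (fun b p => b.insert p.1 (pvMinval p.2)) PySem.Dict.empty with hB
  have hperm : s.Perm log := by rw [hs]; exact PySem.List.sorted2_perm log _ _ false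
  have hinv : pvInv s st := by
    rw [hst, hs]
    simpa using pvInv_fold (PySem.List.sorted2 log (fun e => e.1) (fun e => e.2) false) []
      (PySem.Dict.empty, 1, 0) pvInv_init
  obtain ⟨hnd, hget, hfm⟩ := hinv
  have hsne : s ≠ [] := by
    intro hh
    rw [hh] at hperm
    exact hlog hperm.symm.eq_nil
  rcases hfm with ⟨hp, _⟩ | ⟨_, hfl, hb, d0, v0, hd0, hm⟩
  · exact absurd hp hsne
  -- B-side structure
  have hgget : ∀ d, G.getD d [] = pvTimes log d := by
    intro d
    rw [hG, pvGroups_getD]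
    simp [PySem.Dict.getD_empty]
  have hgkeys : G.keys = PySem.Set.ofList (log.map (fun e => e.2)) := by
    rw [hG, PySem.Dict.keys_foldl_modify_key log (fun e => e.2) [] (fun _ e ts => ts ++ [e.1])
      PySem.Dict.empty, PySem.Dict.keys_empty]
    exact PySem.Set.update_empty _
  have hgnd : G.keys.Nodup := by rw [hgkeys]; exact PySem.Set.nodup_ofList _
  have hbitems : B.items = G.items.map (fun p => (p.1, pvMinval p.2)) := by
    rw [hB]
    have h1 := PySem.Dict.items_foldl_insert_fresh G.items (fun p => p.1)
      (fun p => pvMinval p.2) PySem.Dict.empty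
      (fun a _ => by simp [PySem.Dict.contains_empty])
      (by simpa [PySem.Dict.keys] using hgnd)
    have he : (PySem.Dict.empty : PySem.Dict String Int).items = [] := rfl
    rw [he, List.nil_append] at h1
    simpa using h1
  have hgitems : G.items = G.keys.map (fun k => (k, pvTimes log k)) := by
    rw [PySem.Dict.items_eq_map_keys G hgnd []]
    exact List.map_congr_left (fun k _ => by rw [hgget k])
  have hbitems2 : B.items = G.keys.map (fun k => (k, pvMinval (pvTimes log k))) := by
    rw [hbitems, hgitems, List.map_map]
    rfl
  have hbkeys : B.keys = G.keys := by
    simp only [PySem.Dict.keys, hbitems2, List.map_map]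
    simp [Function.comp]
  have hbnd : B.keys.Nodup := by rw [hbkeys]; exact hgnd
  have hbvalues : B.values = G.keys.map (fun k => pvMinval (pvTimes log k)) := by
    simp only [PySem.Dict.values, hbitems2, List.map_map]
    simp [Function.comp]
  have hbgetD : ∀ d ∈ G.keys, B.getD d 0 = pvMinval (pvTimes log d) := by
    intro d hd
    exact PySem.Dict.getD_of_mem_items B
      (by rw [hbitems2]; exact List.mem_map.mpr ⟨d, hd, rfl⟩) hbnd 0
  -- membership bridge
  have hmem : ∀ d, d ∈ st.1.keys ↔ d ∈ G.keys := by
    intro d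
    rw [hgkeys, PySem.Set.mem_ofList]
    have h1 : d ∈ st.1.keys ↔ ¬ (st.1.get? d = none) := by
      rw [PySem.Dict.get?_eq_none_iff_not_mem_keys, not_not]
    rw [h1, hget d, pvProc_eq_none_iff]
    exact (pvTimes_ne_nil_iff s d).trans (hperm.map (fun e => e.2)).mem_iff
  -- value bridge
  have hval : ∀ d v, st.1.get? d = some v → v.1 = pvMinval (pvTimes log d) := by
    intro d v hdv
    have h0 := (hget d).symm.trans hdv
    cases hts : pvTimes s d with
    | nil => rw [hts] at h0; simp [pvProc] at h0
    | cons t0 rest =>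
      rw [hts, pvProc_cons] at h0
      have hv1 : v = ((pvDiffs t0 rest).foldl min t0, pvLast t0 rest) := by
        injection h0 with h0'; exact h0'.symm
      rw [hv1, pvMinval_eq (pvTimes log d) t0 rest (by rw [pvSortedTimes, ← hs, hts])]
  -- get? is some on keys
  have hsome : ∀ d, d ∈ st.1.keys → ∃ w, st.1.get? d = some w := by
    intro d hd
    cases hq : st.1.get? d with
    | none =>
      rw [PySem.Dict.get?_eq_none_iff_not_mem_keys] at hq
      exact absurd hd hq
    | some w => exact ⟨w, rfl⟩
  -- the global minimum
  have hkne : G.keys ≠ [] := by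
    obtain ⟨e0, he0⟩ := List.exists_mem_of_ne_nil log hlog
    have : e0.2 ∈ G.keys := by
      rw [hgkeys, PySem.Set.mem_ofList]
      exact List.mem_map.mpr ⟨e0, he0, rfl⟩
    exact List.ne_nil_of_mem this
  cases hming : PySem.List.min? B.values (fun x => x) with
  | none =>
    rw [PySem.List.min?_eq_none_iff] at hming
    rw [hbvalues] at hming
    exact absurd (List.map_eq_nil_iff.mp hming) hkne
  | some g =>
    have hgmem : g ∈ B.values := PySem.List.min?_mem hming
    have hgmin : ∀ y ∈ B.values, g ≤ y := fun y hy => PySem.List.min?_isMin hming y hy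
    have hgeq : st.2.2 = g := by
      apply le_antisymm
      · obtain ⟨dg, hdg, hgv⟩ := List.mem_map.mp (hbvalues ▸ hgmem)
        obtain ⟨w, hw⟩ := hsome dg ((hmem dg).mpr hdg)
        calc st.2.2 ≤ w.1 := hb dg w hw
          _ = g := (hval dg w hw).trans hgv
      · have hd0k : d0 ∈ st.1.keys := by
          by_contra hh
          rw [← PySem.Dict.get?_eq_none_iff_not_mem_keys] at hh
          rw [hh] at hd0
          exact absurd hd0 (by simp)
        have hvv : pvMinval (pvTimes log d0) ∈ B.values := by
          rw [hbvalues]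
          exact List.mem_map.mpr ⟨d0, (hmem d0).mp hd0k, rfl⟩
        have := hgmin _ hvv
        rw [hm, hval d0 v0 hd0]
        exact this
    -- final equality of the two returned lists
    have hkeysperm : st.1.keys.Perm G.keys :=
      (List.perm_ext_iff_of_nodup hnd hgnd).mpr (fun a => hmem a)
    have hK : PySem.List.sorted st.1.keys (fun x => x) false
        = PySem.List.sorted G.keys (fun x => x) false :=
      PySem.List.sorted_eq_sorted_of_perm _ _ _ (fun a b hab => hab) hkeysperm
    rw [hK]
    have hpred : ∀ d ∈ PySem.List.sorted G.keys (fun x => x) false,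
        (((st.1.getD d (0, 0)).1 == st.2.2) = (B.getD d 0 == g)) := by
      intro d hd
      have hdk : d ∈ G.keys := (PySem.List.mem_sorted G.keys (fun x => x) false d).mp hd
      obtain ⟨w, hw⟩ := hsome d ((hmem d).mpr hdk)
      have h1 : st.1.getD d (0, 0) = w := by
        rw [PySem.Dict.getD_eq_get?_getD, hw]
        rfl
      rw [h1, hbgetD d hdk, hgeq, hval d w hw]
    rw [List.filter_congr hpred, hbkeys]
    refine (PySem.List.sorted_id_eq_of_perm_of_pairwise _ _ ?_ ?_).symm
    · exact List.Perm.filter _ (PySem.List.sorted_perm G.keys _ false)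
    · exact ((PySem.List.sorted_pairwise G.keys (fun x => x)).sublist List.filter_sublist).imp
        (fun h => h)

lemma formula1_eq (log : List (Int × String)) : formula1 log = formula1_alt log := by
  cases hl : log with
  | nil => rfl
  | cons e rest => exact pvMain (e :: rest) (by simp)

-- ===== VERDICT (by name: the statement is the Claim_ definition above) =====
theorem formula1_spec : Claim_equal_formula1 := by
  intro log _
  unfold Spec_formula1
  exact formula1_eq log
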